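-- pv_equiv track=rewrite | github.com/hermanwu/algorithm-woo | -Algorithms/sorting/log sorting/log_sorting.py | logSort
-- ===== SOURCE A (Python) =====
-- def logSort(logs):
--     if not logs:
--         return res
--
--     messages = []
--     numbers = []
--     for log in logs:
--         index = log.find(" ")
--         if log[index + 1].isalpha():
--             messages.append(log)
--         else:
--             numbers.append(log)
--
--     messages.sort(key = lambda x:(x[x.find(" ") + 1:], x[:x.find(" ")]))
--     messages.extend(numbers)
--     return messages
-- ===== SOURCE B (Python) =====
-- def logSort(logs):
--     def key(log):
--         i = log.find(" ")
--         if log[i + 1].isalpha():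
--             return (0, (log[i + 1:], log[:i]))
--         return (1, ("", ""))
--     return sorted(logs, key=key)
-- ===== Notes on version B (the rewrite author's own statement) =====
-- stated objective: idiomatic
-- what changed: Replaced A's explicit partition-into-two-lists loop, separate tuple-key sort of the letter logs and extend with a single stable sort of the whole input under one key that ranks letter-logs by (0, (message, identifier)) and digit-logs by the constant (1, ('', '')), so sort stability alone preserves the digit-log order.
-- outside the precondition, e.g. on logSort([]): A raises NameError, B returns []; on logSort(['', '']): A raises IndexError, B raises IndexError; on logSort(['ab ']): A raises IndexError, B raises IndexError
import Mathlib
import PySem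

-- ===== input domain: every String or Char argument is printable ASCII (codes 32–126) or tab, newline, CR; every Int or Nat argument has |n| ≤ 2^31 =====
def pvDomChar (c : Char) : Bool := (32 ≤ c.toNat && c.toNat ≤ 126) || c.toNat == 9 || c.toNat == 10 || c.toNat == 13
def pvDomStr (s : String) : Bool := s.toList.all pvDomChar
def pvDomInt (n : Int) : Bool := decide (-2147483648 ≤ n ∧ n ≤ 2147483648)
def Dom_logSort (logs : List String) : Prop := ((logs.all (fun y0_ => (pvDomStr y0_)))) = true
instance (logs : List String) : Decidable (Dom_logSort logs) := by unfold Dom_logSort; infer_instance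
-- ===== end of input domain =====

-- B replaces A's partition-loop + sort-of-one-part + extend by a single stable sort of the
-- whole input under one composite key (idiomatic; same asymptotic cost, no speed claim).

-- ===== PORT A =====
-- the two components of A's sort key  lambda x: (x[x.find(" ")+1:], x[:x.find(" ")])
def aKey1 (x : String) : String := PySem.Str.slice x (some (PySem.Str.find x " " + 1)) none
def aKey2 (x : String) : String := PySem.Str.slice x none (some (PySem.Str.find x " "))

def logSort (logs : List String) : List String :=
  if logs = [] then []   -- Python: 'return res' raises NameError here; excluded by Pre_
  else
    let acc := logs.foldl (fun (acc : List String × List String) log =>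
      let index := PySem.Str.find log " "
      match PySem.Str.pyGet? log (index + 1) with
      | some c =>
          if PySem.Chars.isalpha c then (acc.1 ++ [log], acc.2) else (acc.1, acc.2 ++ [log])
      | none => acc      -- Python raises IndexError here; excluded by Pre_
      ) ([], [])
    PySem.List.sorted2 acc.1 aKey1 aKey2 ++ acc.2

-- ===== PORT B =====
-- B's key: (0, (message, identifier)) for letter-logs, (1, ("", "")) for digit-logs
def bKey (log : String) : Int × Lex (String × String) :=
  let i := PySem.Str.find log " "
  match PySem.Str.pyGet? log (i + 1) with
  | some c =>
      if PySem.Chars.isalpha c then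
        (0, toLex (PySem.Str.slice log (some (i + 1)) none, PySem.Str.slice log none (some i)))
      else (1, toLex ("", ""))
  | none => (1, toLex ("", ""))   -- Python raises IndexError here; excluded by Pre_

def logSort_alt (logs : List String) : List String :=
  PySem.List.sorted2 logs (fun log => (bKey log).1) (fun log => (bKey log).2)

-- ===== PRECONDITION & SPEC =====
-- Pre_ excludes exactly the inputs where A raises: the empty list (NameError on the undefined
-- 'res') and any list containing a log whose char after the first space does not exist
-- (log[index+1] IndexError: an empty string, or a log whose first space is its last char).
def Pre_logSort (logs : List String) : Prop :=
  logs ≠ [] ∧ ∀ l ∈ logs, PySem.Str.find l " " + 1 < (l.toList.length : Int)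
instance (logs : List String) : Decidable (Pre_logSort logs) := by unfold Pre_logSort; infer_instance

def pvWitness_logSort : List String := ["dig1 8 1 5 1", "let1 art can", "let2 own kit dig", "dig2 3 6"]

def Spec_logSort (logs : List String) (out : List String) : Prop := out = logSort_alt logs
instance (logs : List String) (out : List String) : Decidable (Spec_logSort logs out) := by unfold Spec_logSort; infer_instance

-- ===== CLAIM (what is proved, stated in full; the proofs are below) =====
def Claim_equal_logSort : Prop := ∀ (logs : List String), Dom_logSort logs → Pre_logSort logs → Spec_logSort logs (logSort logs)

-- ===== LEMMAS AND PROOFS =====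

-- the letter-log test, as A's loop evaluates it (false also where Python would raise)
def pLet (l : String) : Bool :=
  match PySem.Str.pyGet? l (PySem.Str.find l " " + 1) with
  | some c => PySem.Chars.isalpha c
  | none => false

-- the comparison sorted2 uses for A's tuple key
def before2 (a b : String) : Bool :=
  decide (aKey1 a < aKey1 b) || !decide (aKey1 b < aKey1 a) && decide (aKey2 a < aKey2 b)

-- the comparison sorted2 uses for B's key
def beforeB (a b : String) : Bool :=
  decide ((bKey a).1 < (bKey b).1) || !decide ((bKey b).1 < (bKey a).1) && decide ((bKey a).2 < (bKey b).2)

theorem bKey_of_p {l : String} (h : pLet l = true) :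
    bKey l = ((0 : Int), toLex (aKey1 l, aKey2 l)) := by
  cases hm : PySem.Str.pyGet? l (PySem.Str.find l " " + 1) with
  | none => simp only [pLet, hm] at h; exact Bool.noConfusion h
  | some c =>
      have hi : PySem.Chars.isalpha c = true := by simpa only [pLet, hm] using h
      simp only [bKey, hm, hi, if_true, aKey1, aKey2]

theorem bKey_of_not_p {l : String} (h : pLet l = false) :
    bKey l = ((1 : Int), toLex ("", "")) := by
  cases hm : PySem.Str.pyGet? l (PySem.Str.find l " " + 1) with
  | none => simp only [bKey, hm]
  | some c =>
      have hi : PySem.Chars.isalpha c = false := by simpa only [pLet, hm] using h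
      simp only [bKey, hm, hi, Bool.false_eq_true, if_false]

-- a digit-log is inserted after everything
theorem beforeB_false {x : String} (hx : pLet x = false) (y : String) : beforeB x y = false := by
  unfold beforeB
  rw [bKey_of_not_p hx]
  cases hp : pLet y with
  | true =>
      rw [bKey_of_p hp]
      simp
  | false =>
      rw [bKey_of_not_p hp]
      simp

-- a letter-log is inserted before every digit-log
theorem beforeB_true {x d : String} (hx : pLet x = true) (hd : pLet d = false) :
    beforeB x d = true := by
  unfold beforeB
  rw [bKey_of_p hx, bKey_of_not_p hd]
  simp

-- the two before-relations agree on letter-logs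
theorem cmp_agree {a b : String} (ha : pLet a = true) (hb : pLet b = true) :
    beforeB a b = before2 a b := by
  unfold beforeB before2
  rw [bKey_of_p ha, bKey_of_p hb]
  simp only [lt_self_iff_false, decide_false, Bool.false_or, Bool.not_false, Bool.true_and]
  rw [Bool.eq_iff_iff]
  simp only [decide_eq_true_eq, Bool.or_eq_true, Bool.and_eq_true, Bool.not_eq_true',
    decide_eq_false_iff_not, Prod.Lex.toLex_lt_toLex]
  constructor
  · rintro (h | ⟨he, h⟩)
    · exact Or.inl h
    · exact Or.inr ⟨by rw [← he]; exact lt_irrefl _, h⟩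
  · rintro (h | ⟨hn, h2⟩)
    · exact Or.inl h
    · rcases lt_trichotomy (aKey1 a) (aKey1 b) with h1 | h1 | h1
      · exact Or.inl h1
      · exact Or.inr ⟨h1, h2⟩
      · exact absurd h1 hn

theorem insertBy_congr {α : Type} (b1 b2 : α → α → Bool) (x : α) (ys : List α)
    (h : ∀ y ∈ ys, b1 x y = b2 x y) :
    PySem.List.insertBy b1 x ys = PySem.List.insertBy b2 x ys := by
  induction ys with
  | nil => rfl
  | cons y t ih =>
      simp only [PySem.List.insertBy, h y (List.mem_cons_self)]
      split
      · rfl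
      · rw [ih (fun z hz => h z (List.mem_cons_of_mem y hz))]

theorem insertBy_append_of_before {α : Type} (bf : α → α → Bool) (x : α) (L D : List α)
    (hD : ∀ d ∈ D, bf x d = true) :
    PySem.List.insertBy bf x (L ++ D) = PySem.List.insertBy bf x L ++ D := by
  induction L with
  | nil =>
      cases D with
      | nil => rfl
      | cons d t => simp [PySem.List.insertBy, hD d (List.mem_cons_self)]
  | cons y t ih =>
      simp only [List.cons_append, PySem.List.insertBy]
      split
      · rfl
      · rw [ih, List.cons_append]

theorem sorted2A_eq (xs : List String) :
    PySem.List.sorted2 xs aKey1 aKey2 =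
      xs.foldl (fun acc x => PySem.List.insertBy before2 x acc) [] := rfl

theorem sorted2B_eq (xs : List String) :
    PySem.List.sorted2 xs (fun log => (bKey log).1) (fun log => (bKey log).2) =
      xs.foldl (fun acc x => PySem.List.insertBy beforeB x acc) [] := rfl

theorem mem_sorted2A {xs : List String} {y : String} (h : y ∈ PySem.List.sorted2 xs aKey1 aKey2) :
    y ∈ xs := (PySem.List.sorted2_perm xs aKey1 aKey2 false).mem_iff.mp h

-- MAIN: B's single stable sort equals A's sorted letter part followed by the digit part
theorem main_split (xs : List String) :
    PySem.List.sorted2 xs (fun log => (bKey log).1) (fun log => (bKey log).2) =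
      PySem.List.sorted2 (xs.filter pLet) aKey1 aKey2 ++ xs.filter (fun l => !pLet l) := by
  induction xs using List.reverseRecOn with
  | nil => rfl
  | append_singleton xs x ih =>
      rw [sorted2B_eq, List.foldl_append, ← sorted2B_eq, ih]
      simp only [List.foldl_cons, List.foldl_nil, List.filter_append, List.filter_cons,
        List.filter_nil]
      cases hp : pLet x with
      | true =>
          simp only [Bool.not_true, Bool.false_eq_true, if_false, reduceIte, List.append_nil]
          have hD : ∀ d ∈ List.filter (fun l => !pLet l) xs, beforeB x d = true := by
            intro d hd
            have hd' : pLet d = false := by simpa using (List.mem_filter.mp hd).2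
            exact beforeB_true hp hd'
          have hC : ∀ y ∈ PySem.List.sorted2 (List.filter pLet xs) aKey1 aKey2,
              beforeB x y = before2 x y := fun y hy =>
            cmp_agree hp ((List.mem_filter.mp (mem_sorted2A hy)).2)
          rw [insertBy_append_of_before _ x _ _ hD, insertBy_congr _ before2 x _ hC,
            sorted2A_eq, sorted2A_eq, List.foldl_append, List.foldl_cons, List.foldl_nil]
      | false =>
          simp only [Bool.not_false, Bool.false_eq_true, if_false, reduceIte, List.append_nil]
          rw [PySem.List.insertBy_of_forall_not_before _ x _ (fun y _ => beforeB_false hp y),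
            List.append_assoc]

-- A's partition loop produces (letter-logs, digit-logs) in order
theorem partitionA (xs : List String) (a b : List String)
    (h : ∀ l ∈ xs, PySem.Str.find l " " + 1 < (l.toList.length : Int)) :
    xs.foldl (fun (acc : List String × List String) log =>
      let index := PySem.Str.find log " "
      match PySem.Str.pyGet? log (index + 1) with
      | some c =>
          if PySem.Chars.isalpha c then (acc.1 ++ [log], acc.2) else (acc.1, acc.2 ++ [log])
      | none => acc
      ) (a, b) = (a ++ xs.filter pLet, b ++ xs.filter (fun l => !pLet l)) := by
  induction xs generalizing a b with
  | nil => simp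
  | cons l t ih =>
      have hl := h l (List.mem_cons_self)
      have h0 : (0 : Int) ≤ PySem.Str.find l " " + 1 := by
        have := PySem.Chars.neg_one_le_find l.toList " ".toList
        rw [← PySem.Str.find_eq] at this
        omega
      have hsome : ∃ c, PySem.Str.pyGet? l (PySem.Str.find l " " + 1) = some c := by
        cases hm : PySem.Str.pyGet? l (PySem.Str.find l " " + 1) with
        | some c => exact ⟨c, rfl⟩
        | none =>
            exfalso
            rw [PySem.Str.pyGet?_eq, PySem.Chars.pyGet?_eq_listPyGet?,
              PySem.List.pyGet?_eq_none_iff] at hm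
            exact hm (by unfold PySem.Raise.InRange; omega)
      obtain ⟨c, hc⟩ := hsome
      have hpl : pLet l = PySem.Chars.isalpha c := by unfold pLet; rw [hc]
      simp only [List.foldl_cons, hc, List.filter_cons, hpl]
      cases hal : PySem.Chars.isalpha c with
      | true =>
          simp only [Bool.not_true, reduceIte]
          rw [ih _ _ (fun y hy => h y (List.mem_cons_of_mem l hy))]
          simp [List.append_assoc]
      | false =>
          simp only [Bool.not_false, reduceIte]
          rw [ih _ _ (fun y hy => h y (List.mem_cons_of_mem l hy))]
          simp [List.append_assoc]

-- ===== VERDICT (by name: the statement is the Claim_ definition above) =====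
theorem logSort_spec : Claim_equal_logSort := by
  intro logs _ hpre
  obtain ⟨hne, hall⟩ := hpre
  unfold Spec_logSort logSort logSort_alt
  rw [if_neg hne]
  rw [partitionA logs [] [] hall]
  simp only [List.nil_append]
  exact (main_split logs).symm
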